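-- pv_equiv track=rewrite | github.com/A01029211/AlgoritmosMidterm2 | backtracking.py | build_choice_vector
-- ===== SOURCE A (Python) =====
-- def build_choice_vector(best_matrix, num_tables):
--     choice = [0] * num_tables
--     for i in range(num_tables):
--         label = i + 1
--         for row in best_matrix:
--             if label in row:
--                 choice[i] = 1
--                 break
--     return choice
-- ===== SOURCE B (Python) =====
-- def build_choice_vector(best_matrix, num_tables):
--     choice = [0] * num_tables
--     for row in best_matrix:
--         for v in row:
--             if 1 <= v <= num_tables:
--                 choice[v - 1] = 1
--     return choice
-- ===== Notes on version B (the rewrite author's own statement) =====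
-- stated objective: faster
-- what changed: Instead of scanning the whole matrix once per label (nested per-label search with break), B makes a single sweep over the matrix entries and scatters marks directly into choice[v-1] for in-range values.
import Mathlib
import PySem

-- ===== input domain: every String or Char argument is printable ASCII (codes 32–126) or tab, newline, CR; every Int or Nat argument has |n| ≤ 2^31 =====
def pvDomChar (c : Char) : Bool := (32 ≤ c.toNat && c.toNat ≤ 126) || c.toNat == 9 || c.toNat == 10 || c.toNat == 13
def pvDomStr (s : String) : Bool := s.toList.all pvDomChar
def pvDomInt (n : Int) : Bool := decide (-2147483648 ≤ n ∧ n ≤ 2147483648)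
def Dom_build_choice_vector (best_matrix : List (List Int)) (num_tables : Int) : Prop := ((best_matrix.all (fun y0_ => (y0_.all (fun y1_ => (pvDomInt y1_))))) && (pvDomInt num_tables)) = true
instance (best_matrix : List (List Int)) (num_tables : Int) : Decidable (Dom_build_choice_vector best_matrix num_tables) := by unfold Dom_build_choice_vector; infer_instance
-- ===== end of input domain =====

-- B does a single sweep over the matrix entries, scattering marks by index, instead of A's per-label scan of the whole matrix.

-- ===== PORT A =====
-- for i in range(num_tables): label = i+1; scan rows, on first row containing label set choice[i] = 1 and break
def build_choice_vector (best_matrix : List (List Int)) (num_tables : Int) : List Int :=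
  (PySem.List.pyRange 0 num_tables 1).foldl
    (fun choice i =>
      -- inner 'for row … if label in row: choice[i] = 1; break' = set iff some row contains i+1
      if best_matrix.any (fun row => row.contains (i + 1)) then choice.set i.toNat 1 else choice)
    (List.replicate num_tables.toNat 0)

-- ===== PORT B =====
def build_choice_vector_alt (best_matrix : List (List Int)) (num_tables : Int) : List Int :=
  best_matrix.foldl
    (fun choice row =>
      row.foldl
        (fun c v => if 1 ≤ v ∧ v ≤ num_tables then c.set (v - 1).toNat 1 else c)
        choice)
    (List.replicate num_tables.toNat 0)

-- ===== PRECONDITION & SPEC =====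
def Spec_build_choice_vector (best_matrix : List (List Int)) (num_tables : Int) (out : List Int) : Prop := out = build_choice_vector_alt best_matrix num_tables
instance (best_matrix : List (List Int)) (num_tables : Int) (out : List Int) : Decidable (Spec_build_choice_vector best_matrix num_tables out) := by unfold Spec_build_choice_vector; infer_instance

-- ===== CLAIM (what is proved, stated in full; the proofs are below) =====
def Claim_equal_build_choice_vector : Prop := ∀ (best_matrix : List (List Int)) (num_tables : Int), Dom_build_choice_vector best_matrix num_tables → Spec_build_choice_vector best_matrix num_tables (build_choice_vector best_matrix num_tables)

-- ===== LEMMAS AND PROOFS =====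

-- B's inner fold over one row, per index
theorem bcv_inner_get (n : Int) (row : List Int) (init : List Int) (j : Nat) :
    (row.foldl (fun c v => if 1 ≤ v ∧ v ≤ n then c.set (v - 1).toNat 1 else c) init)[j]? =
      if ((j : Int) + 1) ∈ row ∧ ((j : Int) + 1) ≤ n then (init[j]?).map (fun _ => (1 : Int))
      else init[j]? := by
  induction row generalizing init with
  | nil => simp
  | cons v vs ih =>
    rw [List.foldl_cons, ih]
    by_cases hv : (1 : Int) ≤ v ∧ v ≤ n
    · rw [if_pos hv]
      by_cases hvj : v = (j : Int) + 1
      · have hidx : (v - 1).toNat = j := by omega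
        rw [hidx, List.getElem?_set_self']
        have hr : ((j : Int) + 1) ∈ v :: vs ∧ ((j : Int) + 1) ≤ n := ⟨by rw [hvj]; simp, by omega⟩
        rw [if_pos hr]
        by_cases hm : ((j : Int) + 1) ∈ vs ∧ ((j : Int) + 1) ≤ n
        · rw [if_pos hm]; cases init[j]? <;> rfl
        · rw [if_neg hm]; cases init[j]? <;> rfl
      · have hne : (v - 1).toNat ≠ j := by omega
        rw [List.getElem?_set_ne hne]
        have heq : (((j : Int) + 1) ∈ v :: vs ∧ ((j : Int) + 1) ≤ n) ↔
            (((j : Int) + 1) ∈ vs ∧ ((j : Int) + 1) ≤ n) := by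
          constructor
          · rintro ⟨hmem, hle⟩
            rcases List.mem_cons.mp hmem with h | h
            · exact absurd h.symm hvj
            · exact ⟨h, hle⟩
          · rintro ⟨hmem, hle⟩
            exact ⟨List.mem_cons_of_mem _ hmem, hle⟩
        simp only [heq]
    · rw [if_neg hv]
      have heq : (((j : Int) + 1) ∈ v :: vs ∧ ((j : Int) + 1) ≤ n) ↔
          (((j : Int) + 1) ∈ vs ∧ ((j : Int) + 1) ≤ n) := by
        constructor
        · rintro ⟨hmem, hle⟩
          rcases List.mem_cons.mp hmem with h | h
          · exact absurd ⟨by omega, by omega⟩ hv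
          · exact ⟨h, hle⟩
        · rintro ⟨hmem, hle⟩
          exact ⟨List.mem_cons_of_mem _ hmem, hle⟩
      simp only [heq]

-- B's outer fold over the rows, per index
theorem bcv_alt_get (n : Int) (bm : List (List Int)) (init : List Int) (j : Nat) :
    (bm.foldl (fun choice row =>
        row.foldl (fun c v => if 1 ≤ v ∧ v ≤ n then c.set (v - 1).toNat 1 else c) choice) init)[j]? =
      if (∃ row ∈ bm, ((j : Int) + 1) ∈ row) ∧ ((j : Int) + 1) ≤ n then (init[j]?).map (fun _ => (1 : Int))
      else init[j]? := by
  induction bm generalizing init with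
  | nil => simp
  | cons r rs ih =>
    rw [List.foldl_cons, ih, bcv_inner_get]
    by_cases h1 : ((j : Int) + 1) ∈ r ∧ ((j : Int) + 1) ≤ n
    · rw [if_pos h1]
      have hr : (∃ row ∈ r :: rs, ((j : Int) + 1) ∈ row) ∧ ((j : Int) + 1) ≤ n :=
        ⟨⟨r, by simp, h1.1⟩, h1.2⟩
      rw [if_pos hr]
      by_cases h2 : (∃ row ∈ rs, ((j : Int) + 1) ∈ row) ∧ ((j : Int) + 1) ≤ n
      · rw [if_pos h2]; cases init[j]? <;> rfl
      · rw [if_neg h2]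
    · rw [if_neg h1]
      have heq : ((∃ row ∈ r :: rs, ((j : Int) + 1) ∈ row) ∧ ((j : Int) + 1) ≤ n) ↔
          ((∃ row ∈ rs, ((j : Int) + 1) ∈ row) ∧ ((j : Int) + 1) ≤ n) := by
        constructor
        · rintro ⟨⟨row, hrow, hm⟩, hle⟩
          rcases List.mem_cons.mp hrow with rfl | hrow'
          · exact absurd ⟨hm, hle⟩ h1
          · exact ⟨⟨row, hrow', hm⟩, hle⟩
        · rintro ⟨⟨row, hrow, hm⟩, hle⟩
          exact ⟨⟨row, List.mem_cons_of_mem _ hrow, hm⟩, hle⟩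
      simp only [heq]

-- A's fold over pyRange a n 1 (0 ≤ a), per index
theorem bcv_a_get (n : Int) (bm : List (List Int)) (a : Int) (ha : 0 ≤ a) (init : List Int) (j : Nat) :
    ((PySem.List.pyRange a n 1).foldl
        (fun choice i =>
          if bm.any (fun row => row.contains (i + 1)) then choice.set i.toNat 1 else choice) init)[j]? =
      if a ≤ (j : Int) ∧ (j : Int) < n ∧ (bm.any fun row => row.contains ((j : Int) + 1)) = true then
        (init[j]?).map (fun _ => (1 : Int))
      else init[j]? := by
  by_cases hab : n ≤ a
  · have hno : ¬ (a ≤ (j : Int) ∧ (j : Int) < n ∧ (bm.any fun row => row.contains ((j : Int) + 1)) = true) := by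
      rintro ⟨h1, h2, _⟩; omega
    rw [PySem.List.pyRange_one_eq_nil hab, List.foldl_nil, if_neg hno]
  · have hab' : a < n := by omega
    rw [PySem.List.pyRange_one_cons hab', List.foldl_cons]
    by_cases hcond : (bm.any fun row => row.contains (a + 1)) = true
    · rw [if_pos hcond, bcv_a_get n bm (a + 1) (by omega)]
      by_cases haj : a = (j : Int)
      · have hidx : a.toNat = j := by omega
        rw [hidx, List.getElem?_set_self']
        have hc1 : ¬ (a + 1 ≤ (j : Int) ∧ (j : Int) < n ∧ (bm.any fun row => row.contains ((j : Int) + 1)) = true) := by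
          rintro ⟨h1, _, _⟩; omega
        rw [if_neg hc1]
        have hc2 : a ≤ (j : Int) ∧ (j : Int) < n ∧ (bm.any fun row => row.contains ((j : Int) + 1)) = true :=
          ⟨by omega, by omega, by rw [← haj]; exact hcond⟩
        rw [if_pos hc2]
        cases init[j]? <;> rfl
      · have hne : a.toNat ≠ j := by omega
        rw [List.getElem?_set_ne hne]
        have heq : (a + 1 ≤ (j : Int) ∧ (j : Int) < n ∧ (bm.any fun row => row.contains ((j : Int) + 1)) = true) ↔
            (a ≤ (j : Int) ∧ (j : Int) < n ∧ (bm.any fun row => row.contains ((j : Int) + 1)) = true) := by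
          constructor
          · rintro ⟨h1, h2, h3⟩; exact ⟨by omega, h2, h3⟩
          · rintro ⟨h1, h2, h3⟩; exact ⟨by omega, h2, h3⟩
        simp only [heq]
    · rw [if_neg hcond, bcv_a_get n bm (a + 1) (by omega)]
      have heq : (a + 1 ≤ (j : Int) ∧ (j : Int) < n ∧ (bm.any fun row => row.contains ((j : Int) + 1)) = true) ↔
          (a ≤ (j : Int) ∧ (j : Int) < n ∧ (bm.any fun row => row.contains ((j : Int) + 1)) = true) := by
        constructor
        · rintro ⟨h1, h2, h3⟩; exact ⟨by omega, h2, h3⟩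
        · rintro ⟨h1, h2, h3⟩
          have hne : a ≠ (j : Int) := by rintro rfl; exact hcond h3
          exact ⟨by omega, h2, h3⟩
      simp only [heq]
  termination_by (n - a).toNat
  decreasing_by all_goals omega

-- ===== VERDICT (by name: the statement is the Claim_ definition above) =====
theorem build_choice_vector_spec : Claim_equal_build_choice_vector := by
  intro bm n _
  unfold Spec_build_choice_vector build_choice_vector build_choice_vector_alt
  apply List.ext_getElem?
  intro j
  rw [bcv_a_get n bm 0 le_rfl, bcv_alt_get n bm]
  have heq : (0 ≤ (j : Int) ∧ (j : Int) < n ∧ (bm.any fun row => row.contains ((j : Int) + 1)) = true) ↔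
      ((∃ row ∈ bm, ((j : Int) + 1) ∈ row) ∧ ((j : Int) + 1) ≤ n) := by
    constructor
    · rintro ⟨_, h2, h3⟩
      refine ⟨?_, by omega⟩
      simpa using h3
    · rintro ⟨hex, hle⟩
      exact ⟨by omega, by omega, by simpa using hex⟩
  simp only [heq]
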